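-- pv_equiv track=rewrite | github.com/tarunyaa/sudoku | linter.py | remove_excess_spacing
-- ===== SOURCE A (Python) =====
-- def remove_excess_spacing(lines):
--     '''
--     Rule 1: if we see more than 2 consecutive empty lines, trim to just 1
--     Rule 2: if this is the first line in a block of code, do not allow for an empty line,
--             unless it is the first line after the class declaration
--     '''
--
--     # first pass through applies rule 1
--     cleaned = []
--     for i in range(len(lines)):
--         if i == 0 or i == len(lines) - 1:
--             cleaned.append(lines[i])
--         else:
--             consec_empty_lines = lines[i] == '' and lines[i + 1] == ''
--             if not consec_empty_lines:
--                 cleaned.append(lines[i])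
--
--
--     # second pass through applies rule 2
--     refined = []
--     for i in range(len(cleaned)):
--         if i == 0:
--             refined.append(cleaned[i])
--         else:
--             beginning_of_block = len(cleaned[i-1]) > 0 and cleaned[i - 1][-1] == '{'
--             previous_is_class_header = 'class' in cleaned[i-1]
--             empty_line = cleaned[i] == ''
--
--             if not (beginning_of_block and empty_line and not previous_is_class_header):
--                 refined.append(cleaned[i])
--
--     return refined
-- ===== SOURCE B (Python) =====
-- def remove_excess_spacing(lines):
--     # single fused pass: Rule 1 decided per line (with lookahead), Rule 2 applied
--     # against the last Rule-1 survivor, tracked in `prev`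
--     n = len(lines)
--     refined = []
--     prev = None  # last line that survived Rule 1, or None before the first one
--     for i, line in enumerate(lines):
--         if i == 0 or i == n - 1 or not (line == '' and lines[i + 1] == ''):
--             if prev is None or not (prev != '' and prev[-1] == '{' and line == '' and 'class' not in prev):
--                 refined.append(line)
--             prev = line
--     return refined
-- ===== Notes on version B (the rewrite author's own statement) =====
-- stated objective: faster
-- what changed: Replaces A's two passes with intermediate list `cleaned` by a single fused pass over `lines` that decides Rule 1 per line and applies Rule 2 against the tracked last Rule-1 survivor, building the result directly.
import Mathlib
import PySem

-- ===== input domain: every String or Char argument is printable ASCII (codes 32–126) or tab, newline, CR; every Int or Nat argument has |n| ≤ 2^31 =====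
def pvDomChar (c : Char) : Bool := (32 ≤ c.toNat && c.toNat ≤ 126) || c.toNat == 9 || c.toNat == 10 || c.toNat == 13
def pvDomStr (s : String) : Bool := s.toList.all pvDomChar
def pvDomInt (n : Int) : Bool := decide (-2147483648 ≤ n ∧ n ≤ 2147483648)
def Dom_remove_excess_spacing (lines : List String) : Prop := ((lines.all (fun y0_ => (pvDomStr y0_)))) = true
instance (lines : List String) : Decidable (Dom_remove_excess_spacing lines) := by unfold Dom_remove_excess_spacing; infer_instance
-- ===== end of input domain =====

-- B fuses A's two passes into one pass tracking the last Rule-1 survivor (no intermediate list); measured constant-factor speedup.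


-- ===== PORT A =====
def remove_excess_spacing (lines : List String) : List String :=
  -- first pass through applies rule 1
  let cleaned :=
    (PySem.List.pyRange 0 (PySem.List.len lines) 1).foldl
      (fun cleaned i =>
        if i = 0 ∨ i = PySem.List.len lines - 1 then
          cleaned ++ [PySem.List.pyGetD lines i ""]
        else
          if ¬ (PySem.List.pyGetD lines i "" = "" ∧ PySem.List.pyGetD lines (i + 1) "" = "") then
            cleaned ++ [PySem.List.pyGetD lines i ""]
          else cleaned)
      []
  -- second pass through applies rule 2
  (PySem.List.pyRange 0 (PySem.List.len cleaned) 1).foldl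
    (fun refined i =>
      if i = 0 then
        refined ++ [PySem.List.pyGetD cleaned i ""]
      else
        if ¬ ((0 < PySem.Str.len (PySem.List.pyGetD cleaned (i - 1) "") ∧
                 PySem.Str.pyGet? (PySem.List.pyGetD cleaned (i - 1) "") (-1) = some '{') ∧
               PySem.List.pyGetD cleaned i "" = "" ∧
               ¬ PySem.Str.isIn "class" (PySem.List.pyGetD cleaned (i - 1) "") = true) then
          refined ++ [PySem.List.pyGetD cleaned i ""]
        else refined)
    []

-- ===== PORT B =====
def remove_excess_spacing_alt (lines : List String) : List String :=
  ((PySem.List.enumerate lines 0).foldl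
    (fun (st : List String × Option String) (p : Int × String) =>
      if p.1 = 0 ∨ p.1 = PySem.List.len lines - 1 ∨
          ¬ (p.2 = "" ∧ PySem.List.pyGetD lines (p.1 + 1) "" = "") then
        (if (match st.2 with
             | none => true
             | some pv =>
                 ! decide (pv ≠ "" ∧ PySem.Str.pyGet? pv (-1) = some '{' ∧ p.2 = "" ∧
                           ¬ PySem.Str.isIn "class" pv = true)) = true then
           st.1 ++ [p.2]
         else st.1,
         some p.2)
      else st)
    ([], none)).1

-- ===== PRECONDITION & SPEC =====
def Spec_remove_excess_spacing (lines : List String) (out : List String) : Prop := out = remove_excess_spacing_alt lines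
instance (lines : List String) (out : List String) : Decidable (Spec_remove_excess_spacing lines out) := by unfold Spec_remove_excess_spacing; infer_instance

-- ===== CLAIM (what is proved, stated in full; the proofs are below) =====
def Claim_equal_remove_excess_spacing : Prop := ∀ (lines : List String), Dom_remove_excess_spacing lines → Spec_remove_excess_spacing lines (remove_excess_spacing lines)

-- ===== LEMMAS AND PROOFS =====

-- Rule-2 suppression condition
def sup (pv line : String) : Bool :=
  decide (pv ≠ "" ∧ PySem.Str.pyGet? pv (-1) = some '{' ∧ line = "" ∧ ¬ PySem.Str.isIn "class" pv = true)

-- structural form of A's pass 1 on positions 1..n-1 (last element always kept)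
def p1 : List String → List String
  | [] => []
  | [x] => [x]
  | x :: y :: rest => (if x = "" ∧ y = "" then [] else [x]) ++ p1 (y :: rest)

-- structural form of A's pass 2 after the first element, given the previous element
def p2go (prev : String) : List String → List String
  | [] => []
  | x :: rest => (if sup prev x then [] else [x]) ++ p2go x rest

-- structural form of B's loop after the first Rule-1 survivor
def fgo (prev : String) : List String → List String
  | [] => []
  | [x] => if sup prev x then [] else [x]
  | x :: y :: rest =>
      if x = "" ∧ y = "" then fgo prev (y :: rest)
      else (if sup prev x then [] else [x]) ++ fgo x (y :: rest)

lemma len_pos_iff (s : String) : 0 < PySem.Str.len s ↔ s ≠ "" := by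
  rw [PySem.Str.len_eq, ne_eq, ← String.toList_eq_nil_iff]
  exact_mod_cast List.length_pos_iff


def c1 : List String → List String
  | [] => []
  | x :: rest => x :: p1 rest

def c2 : List String → List String
  | [] => []
  | x :: rest => x :: p2go x rest

def f1 : List String → List String
  | [] => []
  | x :: rest => x :: fgo x rest

lemma pass1_tail (lines : List String) :
    ∀ (m k : Nat) (acc : List String), 1 ≤ k → k + m = lines.length →
      (PySem.List.pyRange (k : Int) (PySem.List.len lines) 1).foldl
        (fun cleaned i =>
          if i = 0 ∨ i = PySem.List.len lines - 1 then
            cleaned ++ [PySem.List.pyGetD lines i ""]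
          else
            if ¬ (PySem.List.pyGetD lines i "" = "" ∧ PySem.List.pyGetD lines (i + 1) "" = "") then
              cleaned ++ [PySem.List.pyGetD lines i ""]
            else cleaned) acc
      = acc ++ p1 (lines.drop k) := by
  intro m
  induction m with
  | zero =>
    intro k acc h1 hk
    have hk' : k = lines.length := by omega
    rw [PySem.List.pyRange_one_eq_nil (by rw [PySem.List.len_eq]; omega), hk', List.drop_length]
    simp [p1]
  | succ m ih =>
    intro k acc h1 hk
    have hklt : k < lines.length := by omega
    rw [PySem.List.pyRange_one_cons (by rw [PySem.List.len_eq]; exact_mod_cast hklt)]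
    simp only [List.foldl_cons]
    have hx : PySem.List.pyGetD lines (k : Int) "" = lines[k] := by
      rw [PySem.List.pyGetD_natCast]; exact List.getD_eq_getElem _ _ hklt
    have hdk : lines.drop k = lines[k] :: lines.drop (k + 1) := List.drop_eq_getElem_cons hklt
    by_cases hlast : k + 1 = lines.length
    · -- last element
      have hcond : (k : Int) = 0 ∨ (k : Int) = PySem.List.len lines - 1 := by
        rw [PySem.List.len_eq]; omega
      rw [if_pos hcond, hx]
      rw [show ((k : Int) + 1) = ((k + 1 : Nat) : Int) by push_cast; ring]
      rw [PySem.List.pyRange_one_eq_nil (by rw [PySem.List.len_eq]; omega), List.foldl_nil]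
      rw [hdk, show lines.drop (k + 1) = [] from by rw [List.drop_eq_nil_iff]; omega]
      simp [p1]
    · -- middle element
      have hcond : ¬ ((k : Int) = 0 ∨ (k : Int) = PySem.List.len lines - 1) := by
        rw [PySem.List.len_eq]; omega
      rw [if_neg hcond]
      have hk1lt : k + 1 < lines.length := by omega
      have hy : PySem.List.pyGetD lines ((k : Int) + 1) "" = lines[k + 1] := by
        rw [show ((k : Int) + 1) = ((k + 1 : Nat) : Int) by push_cast; ring,
          PySem.List.pyGetD_natCast]
        exact List.getD_eq_getElem _ _ hk1lt
      have hdk1 : lines.drop (k + 1) = lines[k + 1] :: lines.drop (k + 2) :=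
        List.drop_eq_getElem_cons hk1lt
      have hrec := fun acc => ih (k + 1) acc (by omega) (by omega)
      rw [hx, hy]
      rw [hdk, hdk1]
      simp only [p1]
      rw [← hdk1]
      by_cases he : lines[k] = "" ∧ lines[k + 1] = ""
      · rw [if_neg (not_not_intro he), if_pos he, List.nil_append]
        rw [show ((k : Int) + 1) = ((k + 1 : Nat) : Int) by push_cast; ring]
        exact hrec acc
      · rw [if_pos he, if_neg he]
        rw [show ((k : Int) + 1) = ((k + 1 : Nat) : Int) by push_cast; ring]
        rw [hrec (acc ++ [lines[k]]), List.append_assoc]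

lemma pass1_full (lines : List String) :
    (PySem.List.pyRange 0 (PySem.List.len lines) 1).foldl
      (fun cleaned i =>
        if i = 0 ∨ i = PySem.List.len lines - 1 then
          cleaned ++ [PySem.List.pyGetD lines i ""]
        else
          if ¬ (PySem.List.pyGetD lines i "" = "" ∧ PySem.List.pyGetD lines (i + 1) "" = "") then
            cleaned ++ [PySem.List.pyGetD lines i ""]
          else cleaned) []
    = c1 lines := by
  match lines with
  | [] => rw [PySem.List.pyRange_one_eq_nil (by rw [PySem.List.len_eq]; simp)]; rfl
  | x :: rest =>
    rw [PySem.List.pyRange_one_cons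
      (by rw [PySem.List.len_eq, List.length_cons]; exact_mod_cast Nat.succ_pos rest.length)]
    simp only [List.foldl_cons]
    rw [if_pos (by simp)]
    rw [show (0 : Int) + 1 = ((1 : Nat) : Int) by norm_num]
    rw [pass1_tail (x :: rest) rest.length 1 ([] ++ [PySem.List.pyGetD (x :: rest) 0 ""])
      (by omega) (by simp [Nat.add_comm])]
    simp [PySem.List.pyGetD_zero_cons, c1]

lemma pass2_tail (cs : List String) :
    ∀ (m k : Nat) (acc : List String), 1 ≤ k → k + m = cs.length →
      (PySem.List.pyRange (k : Int) (PySem.List.len cs) 1).foldl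
        (fun refined i =>
          if i = 0 then
            refined ++ [PySem.List.pyGetD cs i ""]
          else
            if ¬ ((0 < PySem.Str.len (PySem.List.pyGetD cs (i - 1) "") ∧
                     PySem.Str.pyGet? (PySem.List.pyGetD cs (i - 1) "") (-1) = some '{') ∧
                   PySem.List.pyGetD cs i "" = "" ∧
                   ¬ PySem.Str.isIn "class" (PySem.List.pyGetD cs (i - 1) "") = true) then
              refined ++ [PySem.List.pyGetD cs i ""]
            else refined) acc
      = acc ++ p2go (cs.getD (k - 1) "") (cs.drop k) := by
  intro m
  induction m with
  | zero =>
    intro k acc h1 hk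
    have hk' : k = cs.length := by omega
    rw [PySem.List.pyRange_one_eq_nil (by rw [PySem.List.len_eq]; omega), hk', List.drop_length]
    simp [p2go]
  | succ m ih =>
    intro k acc h1 hk
    have hklt : k < cs.length := by omega
    rw [PySem.List.pyRange_one_cons (by rw [PySem.List.len_eq]; exact_mod_cast hklt)]
    simp only [List.foldl_cons]
    have hx : PySem.List.pyGetD cs (k : Int) "" = cs.getD k "" := PySem.List.pyGetD_natCast cs k ""
    have hxg : cs.getD k "" = cs[k] := List.getD_eq_getElem _ _ hklt
    have hprev : PySem.List.pyGetD cs ((k : Int) - 1) "" = cs.getD (k - 1) "" := by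
      rw [show ((k : Int) - 1) = ((k - 1 : Nat) : Int) by omega, PySem.List.pyGetD_natCast]
    have hdk : cs.drop k = cs.getD k "" :: cs.drop (k + 1) := by
      rw [hxg]; exact List.drop_eq_getElem_cons hklt
    rw [if_neg (by omega : ¬ ((k : Int) = 0))]
    rw [hx, hprev]
    have hiff : ((0 < PySem.Str.len (cs.getD (k - 1) "") ∧
          PySem.Str.pyGet? (cs.getD (k - 1) "") (-1) = some '{') ∧
          cs.getD k "" = "" ∧ ¬ PySem.Str.isIn "class" (cs.getD (k - 1) "") = true)
        ↔ sup (cs.getD (k - 1) "") (cs.getD k "") = true := by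
      unfold sup; rw [len_pos_iff, decide_eq_true_iff]; tauto
    have hrec := fun acc => ih (k + 1) acc (by omega) (by omega)
    simp only [show (k + 1 - 1 : Nat) = k from by omega] at hrec
    rw [hdk]
    simp only [p2go]
    by_cases hs : sup (cs.getD (k - 1) "") (cs.getD k "") = true
    · rw [if_neg (not_not_intro (hiff.mpr hs)), if_pos hs, List.nil_append]
      rw [show ((k : Int) + 1) = ((k + 1 : Nat) : Int) by push_cast; ring]
      exact hrec acc
    · rw [if_pos (fun hb => hs (hiff.mp hb)), if_neg hs]
      rw [show ((k : Int) + 1) = ((k + 1 : Nat) : Int) by push_cast; ring]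
      rw [hrec (acc ++ [cs.getD k ""]), List.append_assoc]

lemma pass2_full (cs : List String) :
    (PySem.List.pyRange 0 (PySem.List.len cs) 1).foldl
      (fun refined i =>
        if i = 0 then
          refined ++ [PySem.List.pyGetD cs i ""]
        else
          if ¬ ((0 < PySem.Str.len (PySem.List.pyGetD cs (i - 1) "") ∧
                   PySem.Str.pyGet? (PySem.List.pyGetD cs (i - 1) "") (-1) = some '{') ∧
                 PySem.List.pyGetD cs i "" = "" ∧
                 ¬ PySem.Str.isIn "class" (PySem.List.pyGetD cs (i - 1) "") = true) then
            refined ++ [PySem.List.pyGetD cs i ""]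
          else refined) []
    = c2 cs := by
  match cs with
  | [] => rw [PySem.List.pyRange_one_eq_nil (by rw [PySem.List.len_eq]; simp)]; rfl
  | x :: rest =>
    rw [PySem.List.pyRange_one_cons
      (by rw [PySem.List.len_eq, List.length_cons]; exact_mod_cast Nat.succ_pos rest.length)]
    simp only [List.foldl_cons]
    rw [if_pos (by simp)]
    rw [show (0 : Int) + 1 = ((1 : Nat) : Int) by norm_num]
    rw [pass2_tail (x :: rest) rest.length 1 ([] ++ [PySem.List.pyGetD (x :: rest) 0 ""])
      (by omega) (by simp [Nat.add_comm])]
    simp [PySem.List.pyGetD_zero_cons, c2]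

lemma b_tail (lines : List String) :
    ∀ (suf : List String) (k : Nat) (refined : List String) (prev : String),
      1 ≤ k → lines.drop k = suf →
      ((PySem.List.enumerate suf (k : Int)).foldl
        (fun (st : List String × Option String) (p : Int × String) =>
          if p.1 = 0 ∨ p.1 = PySem.List.len lines - 1 ∨
              ¬ (p.2 = "" ∧ PySem.List.pyGetD lines (p.1 + 1) "" = "") then
            (if (match st.2 with
                 | none => true
                 | some pv =>
                     ! decide (pv ≠ "" ∧ PySem.Str.pyGet? pv (-1) = some '{' ∧ p.2 = "" ∧
                               ¬ PySem.Str.isIn "class" pv = true)) = true then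
               st.1 ++ [p.2]
             else st.1,
             some p.2)
          else st)
        (refined, some prev)).1
      = refined ++ fgo prev suf := by
  intro suf
  induction suf with
  | nil =>
    intro k refined prev h1 hd
    simp [PySem.List.enumerate_nil, fgo]
  | cons x rest ih =>
    intro k refined prev h1 hd
    have hklt : k < lines.length := by
      by_contra h
      rw [List.drop_eq_nil_iff.mpr (by omega)] at hd
      exact List.cons_ne_nil x rest hd.symm
    have hlen : lines.length = k + 1 + rest.length := by
      have := congrArg List.length hd
      rw [List.length_drop] at this
      simp at this; omega
    rw [PySem.List.enumerate_cons]
    simp only [List.foldl_cons]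
    have hsup : ∀ line : String, (match (some prev : Option String) with
         | none => true
         | some pv =>
             ! decide (pv ≠ "" ∧ PySem.Str.pyGet? pv (-1) = some '{' ∧ line = "" ∧
                       ¬ PySem.Str.isIn "class" pv = true)) = true
        ↔ ¬ sup prev line = true := by
      intro line; simp [sup]; tauto
    cases rest with
    | nil =>
      have hcond : (k : Int) = 0 ∨ (k : Int) = PySem.List.len lines - 1 ∨
          ¬ (x = "" ∧ PySem.List.pyGetD lines ((k : Int) + 1) "" = "") := by
        right; left; rw [PySem.List.len_eq]
        have h2 : lines.length = k + 1 := by simpa using hlen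
        omega
      rw [if_pos hcond]
      by_cases hs : sup prev x = true
      · rw [if_neg (by rw [hsup]; exact not_not_intro hs)]
        simp [PySem.List.enumerate_nil, fgo, if_pos hs]
      · rw [if_pos ((hsup x).mpr hs)]
        simp [PySem.List.enumerate_nil, fgo, if_neg hs]
    | cons y rest' =>
      have hy : PySem.List.pyGetD lines ((k : Int) + 1) "" = y := by
        rw [show ((k : Int) + 1) = ((k + 1 : Nat) : Int) by push_cast; ring,
          PySem.List.pyGetD_natCast]
        have h1' : lines[k + 1]? = some y := by
          rw [show k + 1 = k + 1 from rfl, ← List.getElem?_drop, hd]; rfl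
        simp [List.getD, h1']
      have hd1 : lines.drop (k + 1) = y :: rest' := by
        rw [← List.drop_drop, hd]; rfl
      by_cases he : x = "" ∧ y = ""
      · have hcond : ¬ ((k : Int) = 0 ∨ (k : Int) = PySem.List.len lines - 1 ∨
            ¬ (x = "" ∧ PySem.List.pyGetD lines ((k : Int) + 1) "" = "")) := by
          rw [PySem.List.len_eq, hy]
          push Not
          have h2 : lines.length = k + 2 + rest'.length := by simp at hlen; omega
          refine ⟨by omega, by omega, he⟩
        rw [if_neg hcond]
        rw [show ((k : Int) + 1) = ((k + 1 : Nat) : Int) by push_cast; ring]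
        rw [ih (k + 1) refined prev (by omega) hd1]
        simp only [fgo]
        rw [if_pos he]
      · have hcond : (k : Int) = 0 ∨ (k : Int) = PySem.List.len lines - 1 ∨
            ¬ (x = "" ∧ PySem.List.pyGetD lines ((k : Int) + 1) "" = "") := by
          right; right; rw [hy]; exact he
        rw [if_pos hcond]
        simp only [fgo]
        rw [if_neg he]
        rw [show ((k : Int) + 1) = ((k + 1 : Nat) : Int) by push_cast; ring]
        by_cases hs : sup prev x = true
        · rw [if_neg (by rw [hsup]; exact not_not_intro hs)]
          rw [ih (k + 1) refined x (by omega) hd1]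
          rw [if_pos hs, List.nil_append]
        · rw [if_pos ((hsup x).mpr hs)]
          rw [ih (k + 1) (refined ++ [x]) x (by omega) hd1]
          rw [if_neg hs]
          exact (List.append_assoc refined [x] _)

lemma b_full (lines : List String) :
    remove_excess_spacing_alt lines = f1 lines := by
  unfold remove_excess_spacing_alt
  match lines with
  | [] => rfl
  | x :: rest =>
    rw [PySem.List.enumerate_cons]
    simp only [List.foldl_cons]
    rw [if_pos (by simp)]
    rw [if_pos (by norm_num)]
    rw [show (0 : Int) + 1 = ((1 : Nat) : Int) by norm_num]
    rw [b_tail (x :: rest) rest 1 ([] ++ [x]) x (by omega) rfl]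
    rfl

lemma fuse : ∀ (l : List String) (prev : String), fgo prev l = p2go prev (p1 l) := by
  intro l
  induction l with
  | nil => intro prev; rfl
  | cons x t ih =>
    intro prev
    cases t with
    | nil => simp [fgo, p1, p2go]
    | cons y rest =>
      simp only [p1]
      by_cases he : x = "" ∧ y = ""
      · simp only [fgo]
        rw [if_pos he, if_pos he, List.nil_append]
        exact ih prev
      · simp only [fgo]
        rw [if_neg he, if_neg he, List.singleton_append]
        simp only [p2go]
        rw [ih x]

-- ===== VERDICT (by name: the statement is the Claim_ definition above) =====
theorem remove_excess_spacing_spec : Claim_equal_remove_excess_spacing := by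
  intro lines _
  unfold Spec_remove_excess_spacing
  simp only [remove_excess_spacing]
  rw [pass1_full lines, pass2_full (c1 lines), b_full lines]
  cases lines with
  | nil => rfl
  | cons x rest =>
    show c2 (x :: p1 rest) = x :: fgo x rest
    simp only [c2]
    rw [fuse rest x]
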